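-- pv_equiv track=rewrite | github.com/joelhealy/lc101 | unit1/Chapter 07 - Exceptions and Problem Solving/Chapter 07 - Exercise 11.py | diamond
-- ===== SOURCE A (Python) =====
-- def line(n, str):
--     """Return a line consisting of <n> sequential copies of <str>)"""
--
--     return_value = ''
--     for _ in range(n):
--         return_value += str
--     return return_value
--
-- def space_line(spaces, hashes):
--     """
--     Return a line with exactly the specified number of spaces,
--     followed by the specified number of hashes
--     """
--
--     return_value = line(spaces, ' ') + line(hashes, '#')
--     return return_value
--
-- def diamond(n):
--     """
--     Return a diamond where the triangle formed by the top portion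
--     has height n.
--     """
--
--     my_EOL = '\n'
--     return_value = ''
--     for line in range(n):
--         return_value += space_line(n - line - 1, line * 2 + 1) + my_EOL
--     for line in range(n - 1):
--         return_value += space_line(line + 1, 2 * (n - line) - 3) + my_EOL
--     return return_value
-- ===== SOURCE B (Python) =====
-- def diamond(n):
--     """
--     Return a diamond where the triangle formed by the top portion
--     has height n.
--     """
--     rows = []
--     for i in range(2 * n - 1):
--         d = abs(i - (n - 1))
--         rows.append(' ' * d + '#' * (2 * (n - 1 - d) + 1) + '\n')
--     return ''.join(rows)
-- ===== Notes on version B (the rewrite author's own statement) =====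
-- stated objective: simpler
-- what changed: Replaces A's two asymmetric top/bottom loops and the char-by-char line() helper with one symmetric pass over all 2n-1 rows, computing each row's indent as the closed-form distance |i-(n-1)| from the center and using string repetition and a single join.
import Mathlib
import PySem

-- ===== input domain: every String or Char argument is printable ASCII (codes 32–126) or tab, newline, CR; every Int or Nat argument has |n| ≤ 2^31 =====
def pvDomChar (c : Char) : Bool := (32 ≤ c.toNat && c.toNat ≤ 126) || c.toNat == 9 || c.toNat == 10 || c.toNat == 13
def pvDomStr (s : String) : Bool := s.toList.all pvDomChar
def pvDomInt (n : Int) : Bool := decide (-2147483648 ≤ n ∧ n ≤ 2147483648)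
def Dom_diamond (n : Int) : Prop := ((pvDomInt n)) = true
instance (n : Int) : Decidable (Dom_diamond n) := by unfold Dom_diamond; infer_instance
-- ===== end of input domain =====

-- B builds the diamond in one symmetric pass (row indent = distance from center) instead of
-- A's two asymmetric loops with a char-by-char repetition helper; objective: simpler.

-- ===== PORT A =====
-- line(n, str): repeated concatenation, one copy per loop iteration
def lineA (n : Int) (s : String) : String :=
  (PySem.List.pyRange 0 n 1).foldl (fun acc _ => acc ++ s) ""

def space_lineA (spaces hashes : Int) : String :=
  lineA spaces " " ++ lineA hashes "#"

def diamond (n : Int) : String :=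
  let r1 := (PySem.List.pyRange 0 n 1).foldl
    (fun acc l => acc ++ (space_lineA (n - l - 1) (l * 2 + 1) ++ "\n")) ""
  (PySem.List.pyRange 0 (n - 1) 1).foldl
    (fun acc l => acc ++ (space_lineA (l + 1) (2 * (n - l) - 3) ++ "\n")) r1

-- ===== PORT B =====
-- rows built by string repetition (' '*d, '#'*k: replicate with toNat, exact since Python
-- returns '' for a non-positive count just as toNat clamps to 0), then a single join
def diamond_alt (n : Int) : String :=
  String.join (((PySem.List.pyRange 0 (2 * n - 1) 1).map (fun i =>
    let d : Int := |i - (n - 1)|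
    String.ofList (List.replicate d.toNat ' ')
      ++ String.ofList (List.replicate (2 * (n - 1 - d) + 1).toNat '#') ++ "\n")))

-- ===== PRECONDITION & SPEC =====
def Spec_diamond (n : Int) (out : String) : Prop := out = diamond_alt n
instance (n : Int) (out : String) : Decidable (Spec_diamond n out) := by unfold Spec_diamond; infer_instance

-- ===== CLAIM (what is proved, stated in full; the proofs are below) =====
def Claim_equal_diamond : Prop := ∀ (n : Int), Dom_diamond n → Spec_diamond n (diamond n)

-- ===== LEMMAS AND PROOFS =====

-- String.foldl with ++ : the initial segment factors out
theorem str_foldl_init (zs : List String) (b : String) :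
    zs.foldl (· ++ ·) b = b ++ zs.foldl (· ++ ·) "" := by
  induction zs generalizing b with
  | nil => simp
  | cons z zt ih => rw [List.foldl_cons, List.foldl_cons, ih (b ++ z), ih (("" : String) ++ z),
      String.append_assoc]; simp

theorem join_cons (a : String) (l : List String) :
    String.join (a :: l) = a ++ String.join l := by
  simp only [String.join, List.foldl_cons, String.empty_append]
  exact str_foldl_init l a

theorem join_append (xs ys : List String) :
    String.join (xs ++ ys) = String.join xs ++ String.join ys := by
  induction xs with
  | nil => simp [String.join]
  | cons a as ih => rw [List.cons_append, join_cons, join_cons, ih, String.append_assoc]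

-- a fold that appends a row per element is the join of the mapped rows
theorem foldl_append_str (l : List Int) (g : Int → String) (acc : String) :
    l.foldl (fun a x => a ++ g x) acc = acc ++ String.join (l.map g) := by
  induction l generalizing acc with
  | nil => simp [String.join]
  | cons x xs ih => rw [List.foldl_cons, ih, List.map_cons, join_cons, String.append_assoc]

-- joining copies of a one-character string is a replicate of that character
theorem join_replicate_char (m : Nat) (c : Char) :
    String.join (List.replicate m (String.ofList [c])) = String.ofList (List.replicate m c) := by
  induction m with
  | zero => simp [String.join]
  | succ k ih =>
      rw [List.replicate_succ, join_cons, ih]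
      conv_rhs => rw [List.replicate_succ, ← List.singleton_append, String.ofList_append]

-- A's line helper equals a character replicate
theorem lineA_eq (k : Int) (c : Char) :
    lineA k (String.ofList [c]) = String.ofList (List.replicate k.toNat c) := by
  unfold lineA
  rw [foldl_append_str, List.map_const', PySem.List.length_pyRange_one]
  simp [join_replicate_char]

theorem diamond_spec_aux (n : Int) : diamond n = diamond_alt n := by
  unfold diamond diamond_alt
  rw [foldl_append_str, foldl_append_str, String.empty_append]
  by_cases hn : n ≤ 0
  · rw [PySem.List.pyRange_one_eq_nil hn, PySem.List.pyRange_one_eq_nil (by omega : n - 1 ≤ 0),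
        PySem.List.pyRange_one_eq_nil (by omega : 2 * n - 1 ≤ 0)]
    simp [String.join]
  · rw [not_le] at hn
    rw [PySem.List.pyRange_one_append 0 n (2 * n - 1) (by omega) (by omega), List.map_append,
        join_append]
    congr 1
    · -- top: rows 0 … n-1
      congr 1
      apply List.map_congr_left
      intro i hi
      rw [PySem.List.mem_pyRange_one] at hi
      have hd : |i - (n - 1)| = n - 1 - i := by
        rw [abs_of_nonpos (by omega)]; ring
      simp only [hd]
      unfold space_lineA
      rw [show (" " : String) = String.ofList [' '] from rfl,
          show ("#" : String) = String.ofList ['#'] from rfl, lineA_eq, lineA_eq]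
      have h1 : (n - i - 1).toNat = (n - 1 - i).toNat := by omega
      have h2 : (i * 2 + 1).toNat = (2 * (n - 1 - (n - 1 - i)) + 1).toNat := by omega
      rw [h1, h2, String.append_assoc]
    · -- bottom: rows n … 2n-2, re-indexed against A's second loop
      rw [PySem.List.pyRange_one, PySem.List.pyRange_one]
      rw [List.map_map, List.map_map]
      have hlen : (2 * n - 1 - n).toNat = (n - 1 - 0).toNat := by omega
      rw [hlen]
      congr 1
      apply List.map_congr_left
      intro k hk
      rw [List.mem_range] at hk
      simp only [Function.comp_apply]
      have hd : |n + (k : Int) - (n - 1)| = (k : Int) + 1 := by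
        rw [abs_of_nonneg (by omega)]; ring
      simp only [hd]
      unfold space_lineA
      rw [show (" " : String) = String.ofList [' '] from rfl,
          show ("#" : String) = String.ofList ['#'] from rfl, lineA_eq, lineA_eq]
      have h1 : (0 + (k : Int) + 1).toNat = ((k : Int) + 1).toNat := by omega
      have h2 : (2 * (n - (0 + (k : Int))) - 3).toNat
              = (2 * (n - 1 - ((k : Int) + 1)) + 1).toNat := by omega
      rw [h1, h2, String.append_assoc]

-- ===== VERDICT (by name: the statement is the Claim_ definition above) =====
theorem diamond_spec : Claim_equal_diamond := by
  intro n _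
  unfold Spec_diamond
  exact diamond_spec_aux n
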